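-- pv_equiv track=rewrite | github.com/kfuku52/cdskit | cdskit/plot.py | _consensus_nt_for_codons
-- ===== SOURCE A (Python) =====
-- from collections import Counter
--
-- def _consensus_nt_for_codons(codons):
--     out = list()
--     for pos in range(3):
--         chars = [codon[pos].upper() for codon in codons if len(codon) == 3]
--         informative = [ch for ch in chars if ch not in ('-', '?', '.')]
--         if len(informative) == 0:
--             out.append('-')
--             continue
--         counts = Counter(informative)
--         out.append(sorted(counts.items(), key=lambda item: (-item[1], item[0]))[0][0])
--     return ''.join(out)
-- ===== SOURCE B (Python) =====
-- def _consensus_nt_for_codons(codons):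
--     # Sort-then-scan instead of hash counting: per position, sort the informative
--     # uppercase characters and take the first longest run (ascending order makes
--     # the first maximal run the alphabetically smallest most-frequent character,
--     # exactly A's (-count, char) tie-break) -- no Counter, no items sort.
--     out = []
--     for pos in range(3):
--         chars = sorted(codon[pos].upper() for codon in codons
--                        if len(codon) == 3 and codon[pos].upper() not in ('-', '?', '.'))
--         best, best_run, cur, cur_run = '-', 0, None, 0
--         for ch in chars:
--             cur_run = cur_run + 1 if ch == cur else 1
--             cur = ch
--             if cur_run > best_run:
--                 best, best_run = ch, cur_run
--         out.append(best)
--     return ''.join(out)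
-- ===== Notes on version B (the rewrite author's own statement) =====
-- stated objective: alternative
-- what changed: A counts each position's informative characters with a Counter and sorts the (char,count) items by (-count,char); B never counts into a hash at all: it sorts the informative characters themselves and scans the sorted list once for its first longest run, which is exactly the alphabetically-least most-frequent character.
import Mathlib
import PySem

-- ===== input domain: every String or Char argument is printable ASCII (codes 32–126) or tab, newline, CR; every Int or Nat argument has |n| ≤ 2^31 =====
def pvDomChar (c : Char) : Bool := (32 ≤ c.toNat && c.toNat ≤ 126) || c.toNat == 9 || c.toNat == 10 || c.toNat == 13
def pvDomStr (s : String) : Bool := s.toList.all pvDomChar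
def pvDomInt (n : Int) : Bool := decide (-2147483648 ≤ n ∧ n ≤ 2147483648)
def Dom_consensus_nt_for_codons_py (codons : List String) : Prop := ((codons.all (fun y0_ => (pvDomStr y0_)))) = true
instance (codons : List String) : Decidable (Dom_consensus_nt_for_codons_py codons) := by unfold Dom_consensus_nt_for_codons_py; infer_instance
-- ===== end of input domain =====

-- B replaces A's Counter-and-sort-the-items selection by sort-then-scan: per position it
-- sorts the informative characters and takes the first longest run (ascending order makes
-- that the alphabetically smallest most-frequent character, A's exact tie-break).

-- ===== PORT A =====
-- chars = [codon[pos].upper() for codon in codons if len(codon) == 3]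
def pvAChars (codons : List String) (pos : Int) : List Char :=
  (codons.filter (fun codon => PySem.Str.len codon == 3)).filterMap
    (fun codon => (PySem.Str.pyGet? codon pos).map PySem.Chars.upperChar)

-- informative = [ch for ch in chars if ch not in ('-', '?', '.')]
def pvAInformative (codons : List String) (pos : Int) : List Char :=
  (pvAChars codons pos).filter (fun ch => !(ch == '-' || ch == '?' || ch == '.'))

-- `out.append('-')` / `out.append(sorted(counts.items(), key=lambda item: (-item[1], item[0]))[0][0])`
def pvASelect (informative : List Char) : Char :=
  if informative.length == 0 then '-'
  else
    match PySem.List.sorted2 (PySem.Dict.counter informative).items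
            (fun it => -it.2) (fun it => it.1) with
    | [] => '-'          -- unreachable: the counter of a nonempty list has items
    | it :: _ => it.1

-- one iteration of A's `for pos in range(3)` loop body (the appended character)
def pvAPos (codons : List String) (pos : Int) : Char :=
  pvASelect (pvAInformative codons pos)

def consensus_nt_for_codons_py (codons : List String) : String :=
  String.ofList ((PySem.List.pyRange 0 3).map (fun pos => pvAPos codons pos))

-- ===== PORT B =====
-- the generator: codon[pos].upper() for codon in codons if len(codon) == 3 and … not in ('-','?','.')
def pvBRaw (codons : List String) (pos : Int) : List Char :=
  codons.filterMap (fun codon =>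
    if PySem.Str.len codon == 3 then
      match (PySem.Str.pyGet? codon pos).map PySem.Chars.upperChar with
      | none => none
      | some ch => if !(ch == '-' || ch == '?' || ch == '.') then some ch else none
    else none)

-- chars = sorted(<generator>)
def pvBChars (codons : List String) (pos : Int) : List Char :=
  PySem.List.sorted (pvBRaw codons pos) (fun x => x) false

-- loop body over (best, best_run, cur, cur_run); cur : Option Char starts as None
def pvBScan (st : Char × Int × Option Char × Int) (ch : Char) : Char × Int × Option Char × Int :=
  let curRun : Int := if some ch == st.2.2.1 then st.2.2.2 + 1 else 1
  if st.2.1 < curRun then (ch, curRun, some ch, curRun)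
  else (st.1, st.2.1, some ch, curRun)

-- the character appended for one position: first longest run of the sorted chars
def pvBPos (codons : List String) (pos : Int) : Char :=
  ((pvBChars codons pos).foldl pvBScan ('-', 0, none, 0)).1

def consensus_nt_for_codons_py_alt (codons : List String) : String :=
  String.ofList ((PySem.List.pyRange 0 3).map (fun pos => pvBPos codons pos))

-- ===== PRECONDITION & SPEC =====
def Spec_consensus_nt_for_codons_py (codons : List String) (out : String) : Prop := out = consensus_nt_for_codons_py_alt codons
instance (codons : List String) (out : String) : Decidable (Spec_consensus_nt_for_codons_py codons out) := by unfold Spec_consensus_nt_for_codons_py; infer_instance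

-- ===== CLAIM (what is proved, stated in full; the proofs are below) =====
def Claim_equal_consensus_nt_for_codons_py : Prop := ∀ (codons : List String), Dom_consensus_nt_for_codons_py codons → Spec_consensus_nt_for_codons_py codons (consensus_nt_for_codons_py codons)

-- ===== LEMMAS AND PROOFS =====

-- the characterisation both selections satisfy: a most-frequent informative character,
-- alphabetically least among those of maximal count
def pvIsPick (l : List Char) (c : Char) : Prop :=
  c ∈ l ∧ ∀ d ∈ l, l.count d < l.count c ∨ (l.count d = l.count c ∧ c ≤ d)

theorem pvIsPick_unique {l : List Char} {a b : Char}
    (ha : pvIsPick l a) (hb : pvIsPick l b) : a = b := by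
  obtain ⟨hma, hia⟩ := ha
  obtain ⟨hmb, hib⟩ := hb
  rcases hia b hmb with h | ⟨hc, hab⟩
  · rcases hib a hma with h' | ⟨hc', hba⟩ <;> omega
  · rcases hib a hma with h' | ⟨hc', hba⟩
    · omega
    · exact le_antisymm hab hba

theorem pvIsPick_of_perm {s l : List Char} (hp : s.Perm l) {c : Char}
    (h : pvIsPick s c) : pvIsPick l c := by
  obtain ⟨hm, hi⟩ := h
  refine ⟨hp.mem_iff.1 hm, fun d hd => ?_⟩
  have := hi d (hp.mem_iff.2 hd)
  simpa [hp.count_eq] using this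

-- ---- A's selection satisfies pvIsPick ----

-- the lexicographic (-count, char) comparator A's sort follows
def pvLt (a b : Char × Int) : Bool :=
  decide (-a.2 < -b.2) || (!decide (-b.2 < -a.2) && decide (a.1 < b.1))

def pvKey (a : Char × Int) : Int ×ₗ Char := toLex (-a.2, a.1)

theorem pvLt_iff (a b : Char × Int) : pvLt a b = true ↔ pvKey a < pvKey b := by
  simp only [pvLt, pvKey, Prod.Lex.toLex_lt_toLex, Bool.or_eq_true, Bool.and_eq_true,
    Bool.not_eq_true', decide_eq_true_eq, decide_eq_false_iff_not]
  constructor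
  · rintro (h | ⟨h, h'⟩)
    · exact Or.inl h
    · by_cases h0 : -a.2 < -b.2
      · exact Or.inl h0
      · exact Or.inr ⟨by omega, h'⟩
  · rintro (h | ⟨h, h'⟩)
    · exact Or.inl h
    · exact Or.inr ⟨by omega, h'⟩

theorem pvLt_false_iff (a b : Char × Int) : pvLt a b = false ↔ pvKey b ≤ pvKey a := by
  rw [← not_lt, ← pvLt_iff]; simp

theorem pvLt_irrefl (a : Char × Int) : pvLt a a = false := by
  rw [pvLt_false_iff]

theorem pvLt_trans {a b c : Char × Int} (h1 : pvLt a b = true) (h2 : pvLt b c = true) :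
    pvLt a c = true := by
  rw [pvLt_iff] at *; exact lt_trans h1 h2

theorem pvLt_asymm {a b : Char × Int} (h : pvLt a b = true) : pvLt b a = false := by
  rw [pvLt_iff] at h; rw [pvLt_false_iff]; exact le_of_lt h

def pvInv (acc : List (Char × Int)) : Prop :=
  ∀ h, acc.head? = some h → ∀ z ∈ acc, pvLt z h = false

theorem pvInv_insertBy (x : Char × Int) (acc : List (Char × Int)) (hinv : pvInv acc) :
    pvInv (PySem.List.insertBy (fun a b => pvLt a b) x acc) := by
  induction acc with
  | nil =>
    intro h hh z hz
    simp [PySem.List.insertBy] at hh hz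
    subst hh; subst hz; exact pvLt_irrefl _
  | cons y ys ih =>
    by_cases hxy : pvLt x y = true
    · intro h hh z hz
      simp only [PySem.List.insertBy, hxy, if_pos] at hh hz
      simp only [List.head?_cons, Option.some.injEq] at hh
      subst hh
      rcases List.mem_cons.1 hz with hz | hz
      · subst hz; exact pvLt_irrefl _
      · rcases List.mem_cons.1 hz with hz | hz
        · subst hz; exact pvLt_asymm hxy
        · have hzy : pvLt z y = false := hinv y rfl z (List.mem_cons.2 (Or.inr hz))
          by_cases hc : pvLt z x = true
          · have := pvLt_trans hc hxy
            rw [hzy] at this; exact absurd this (by simp)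
          · simpa using hc
    · have hb : pvLt x y = false := by simpa using hxy
      intro h hh z hz
      simp only [PySem.List.insertBy, hb, Bool.false_eq_true, if_false] at hh hz
      simp only [List.head?_cons, Option.some.injEq] at hh
      subst hh
      rcases List.mem_cons.1 hz with hz | hz
      · subst hz; exact pvLt_irrefl _
      · have := (PySem.List.insertBy_perm (fun a b => pvLt a b) x ys).mem_iff.1 hz
        rcases List.mem_cons.1 this with hz' | hz'
        · subst hz'; exact hb
        · exact hinv y rfl z (List.mem_cons.2 (Or.inr hz'))

theorem pvInv_foldl (xs acc : List (Char × Int)) (hinv : pvInv acc) :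
    pvInv (xs.foldl (fun acc x => PySem.List.insertBy (fun a b => pvLt a b) x acc) acc) := by
  induction xs generalizing acc with
  | nil => exact hinv
  | cons x t ih => exact ih _ (pvInv_insertBy x acc hinv)

theorem pvSorted2_eq (xs : List (Char × Int)) :
    PySem.List.sorted2 xs (fun it => -it.2) (fun it => it.1) =
      xs.foldl (fun acc x => PySem.List.insertBy (fun a b => pvLt a b) x acc) [] := by
  simp only [PySem.List.sorted2]
  congr 1

theorem pvSortedHead_spec (xs : List (Char × Int)) (hd : Char × Int) (t : List (Char × Int))
    (hs : PySem.List.sorted2 xs (fun it => -it.2) (fun it => it.1) = hd :: t) :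
    hd ∈ xs ∧ ∀ y ∈ xs, pvLt y hd = false := by
  have hperm := PySem.List.sorted2_perm xs (fun it => -it.2) (fun it => it.1) false
  rw [hs] at hperm
  have hinv := pvInv_foldl xs [] (by intro h hh z hz; simp at hh)
  rw [← pvSorted2_eq] at hinv
  rw [hs] at hinv
  refine ⟨hperm.mem_iff.1 List.mem_cons_self, ?_⟩
  intro y hy
  exact hinv hd rfl y (hperm.mem_iff.2 hy)

theorem pvItems_ne_nil (l : List Char) (h : l ≠ []) :
    (PySem.Dict.counter l).items ≠ [] := by
  rw [PySem.Dict.items_counter]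
  obtain ⟨c, hc⟩ := List.exists_mem_of_ne_nil l h
  have hmem : c ∈ PySem.Set.ofList l := by simp [PySem.Set.mem_ofList, hc]
  intro he
  rw [List.map_eq_nil_iff] at he
  rw [he] at hmem
  simp at hmem

theorem pvASelect_spec (l : List Char) (h : l ≠ []) : pvIsPick l (pvASelect l) := by
  have hne := pvItems_ne_nil l h
  have hlen : (l.length == 0) = false := by simp [List.length_eq_zero_iff, h]
  unfold pvASelect
  rw [hlen]
  simp only [Bool.false_eq_true, if_false]
  rcases hsort : PySem.List.sorted2 (PySem.Dict.counter l).items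
      (fun it => -it.2) (fun it => it.1) with _ | ⟨hd, t⟩
  · have := PySem.List.sorted2_perm (PySem.Dict.counter l).items
      (fun it => -it.2) (fun it => it.1) false
    rw [hsort] at this
    exact absurd this.symm.eq_nil hne
  · show pvIsPick l hd.1
    obtain ⟨hhd, hmin⟩ := pvSortedHead_spec _ _ _ hsort
    rw [PySem.Dict.items_counter] at hhd hmin
    obtain ⟨k, hk, hkeq⟩ := List.mem_map.1 hhd
    have hkl : k ∈ l := (PySem.Set.mem_ofList l k).1 hk
    subst hkeq
    show pvIsPick l k
    refine ⟨hkl, fun d hd' => ?_⟩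
    have hdl : (d, (l.count d : Int)) ∈
        (PySem.Set.ofList l).map (fun k => (k, (l.count k : Int))) :=
      List.mem_map.2 ⟨d, (PySem.Set.mem_ofList l d).2 hd', rfl⟩
    have hle := (pvLt_false_iff _ _).1 (hmin _ hdl)
    simp only [pvKey, Prod.Lex.toLex_le_toLex] at hle
    rcases hle with hle | ⟨hle, hle'⟩
    · left; omega
    · right; exact ⟨by omega, hle'⟩

-- ---- B's scan satisfies pvIsPick ----

theorem pvLe_getLast {p : List Char} (hp : p.Pairwise (· ≤ ·)) (h : p ≠ []) :
    ∀ x ∈ p, x ≤ p.getLast h := by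
  induction p with
  | nil => simp
  | cons y t ih =>
    intro x hx
    rcases List.eq_nil_or_concat t with ht | ⟨t', z, hz⟩
    · subst ht; simp at hx; subst hx; simp
    · have htne : t ≠ [] := by subst hz; simp
      rw [List.getLast_cons htne]
      rcases List.mem_cons.1 hx with hx | hx
      · subst hx
        exact (List.pairwise_cons.1 hp).1 _ (List.getLast_mem htne)
      · exact ih (List.pairwise_cons.1 hp).2 htne x hx

-- loop invariant of B's run scan over the processed (sorted) prefix p
def pvInvB (p : List Char) (st : Char × Int × Option Char × Int) : Prop :=
  (p = [] ∧ st = ('-', 0, none, 0)) ∨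
  (∃ h : p ≠ [],
    st.2.2.1 = some (p.getLast h) ∧ st.2.2.2 = (p.count (p.getLast h) : Int) ∧
    pvIsPick p st.1 ∧ st.2.1 = (p.count st.1 : Int))

theorem pvInvB_step (p : List Char) (ch : Char) (st : Char × Int × Option Char × Int)
    (hp : p.Pairwise (· ≤ ·)) (hch : ∀ x ∈ p, x ≤ ch) (hinv : pvInvB p st) :
    pvInvB (p ++ [ch]) (pvBScan st ch) := by
  obtain ⟨best, bestRun, cur, curRun⟩ := st
  rcases hinv with ⟨hpn, hst⟩ | ⟨hne, hcur, hrun, hpick, hbest⟩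
  · subst hpn
    rw [hst]
    have hstep : pvBScan ('-', 0, none, 0) ch = (ch, 1, some ch, 1) := by
      simp [pvBScan]
    rw [hstep]
    refine Or.inr ⟨by simp, by simp, by simp, ⟨by simp, ?_⟩, by simp⟩
    intro d hd
    simp only [List.nil_append, List.mem_singleton] at hd
    subst hd
    exact Or.inr ⟨rfl, le_refl _⟩
  · dsimp only at hcur hrun hbest hpick
    obtain ⟨hmem, hmin⟩ := hpick
    subst hcur hrun hbest
    set g := p.getLast hne with hg
    have hgp : g ∈ p := List.getLast_mem hne
    have hle_g : ∀ x ∈ p, x ≤ g := pvLe_getLast hp hne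
    have hcount_app : ∀ d : Char, (p ++ [ch]).count d = p.count d + if d = ch then 1 else 0 := by
      intro d
      rw [List.count_append]
      by_cases hd : d = ch
      · subst hd; simp
      · simp [hd, Ne.symm hd]
    have hlast : (p ++ [ch]).getLast (by simp) = ch := by simp
    by_cases hcg : ch = g
    · -- run continues: ch equals the last character of the prefix
      subst hcg
      have hstep : pvBScan (best, ((p.count best : Int)), some g, ((p.count g : Int))) g
          = if ((p.count best : Int)) < ((p.count g : Int)) + 1 then
              (g, (p.count g : Int) + 1, some g, (p.count g : Int) + 1)
            else (best, (p.count best : Int), some g, (p.count g : Int) + 1) := by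
        simp [pvBScan]
      rw [hstep]
      by_cases hcond : ((p.count best : Int)) < ((p.count g : Int)) + 1
      · rw [if_pos hcond]
        refine Or.inr ⟨by simp, by simp [hlast], ?_, ⟨by simp, ?_⟩, ?_⟩
        · show ((p.count g : Int)) + 1 = ((p ++ [g]).count ((p ++ [g]).getLast (by simp)) : Int)
          rw [hlast, hcount_app, if_pos rfl]
          push_cast; ring
        · intro d hd
          rcases List.mem_append.1 hd with hd | hd
          · by_cases hdc : d = g
            · subst hdc; exact Or.inr ⟨rfl, le_refl _⟩
            · left
              rw [hcount_app d, hcount_app g, if_neg hdc, if_pos rfl]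
              have hdb := hmin d hd
              have : p.count d ≤ p.count best := by rcases hdb with h | ⟨h, _⟩ <;> omega
              omega
          · simp only [List.mem_singleton] at hd
            subst hd
            exact Or.inr ⟨rfl, le_refl _⟩
        · show ((p.count g : Int)) + 1 = ((p ++ [g]).count g : Int)
          rw [hcount_app, if_pos rfl]
          push_cast; ring
      · rw [if_neg hcond]
        have hlt : p.count g + 1 ≤ p.count best := by omega
        have hbne : best ≠ g := by
          intro h; rw [h] at hlt; omega
        have hcb : (p ++ [g]).count best = p.count best := by
          rw [hcount_app, if_neg hbne]; omega
        refine Or.inr ⟨by simp, by simp [hlast], ?_, ⟨List.mem_append_left _ hmem, ?_⟩, ?_⟩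
        · show ((p.count g : Int)) + 1 = ((p ++ [g]).count ((p ++ [g]).getLast (by simp)) : Int)
          rw [hlast, hcount_app, if_pos rfl]
          push_cast; ring
        · intro d hd
          rcases List.mem_append.1 hd with hd | hd
          · by_cases hdc : d = g
            · subst hdc
              rw [hcount_app g, if_pos rfl, hcb]
              by_cases he : p.count g + 1 = p.count best
              · exact Or.inr ⟨he, hle_g best hmem⟩
              · left; omega
            · rw [hcount_app d, if_neg hdc, hcb]
              simpa using hmin d hd
          · simp only [List.mem_singleton] at hd
            subst hd
            rw [hcount_app g, if_pos rfl, hcb]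
            by_cases he : p.count g + 1 = p.count best
            · exact Or.inr ⟨he, hle_g best hmem⟩
            · left; omega
        · show ((p.count best : Int)) = ((p ++ [g]).count best : Int)
          rw [hcb]
    · -- new run: ch differs from (and exceeds) every character of the prefix
      have hchp : ch ∉ p := fun hin => hcg (le_antisymm (hle_g ch hin) (hch g hgp))
      have hc0 : p.count ch = 0 := by
        simpa [List.count_eq_zero] using hchp
      have hbpos : 0 < p.count best := List.count_pos_iff.2 hmem
      have hstep : pvBScan (best, ((p.count best : Int)), some g, ((p.count g : Int))) ch
          = (best, (p.count best : Int), some ch, 1) := by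
        have hb : (some ch == some g) = false := by simp [hcg]
        have hnotlt : ¬ ((p.count best : Int) < 1) := by omega
        simp only [pvBScan, hb, Bool.false_eq_true, if_false]
        rw [if_neg hnotlt]
      rw [hstep]
      have hbne : best ≠ ch := fun h => hchp (h ▸ hmem)
      have hcb : (p ++ [ch]).count best = p.count best := by
        rw [hcount_app, if_neg hbne]; omega
      have hcch : (p ++ [ch]).count ch = 1 := by
        rw [hcount_app, if_pos rfl, hc0]
      refine Or.inr ⟨by simp, by simp [hlast], ?_, ⟨List.mem_append_left _ hmem, ?_⟩, ?_⟩
      · show (1 : Int) = ((p ++ [ch]).count ((p ++ [ch]).getLast (by simp)) : Int)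
        rw [hlast, hcch]; norm_num
      · intro d hd
        rcases List.mem_append.1 hd with hd | hd
        · have hdc : d ≠ ch := fun h => hchp (h ▸ hd)
          rw [hcount_app d, if_neg hdc, hcb]
          simpa using hmin d hd
        · simp only [List.mem_singleton] at hd
          subst hd
          rw [hcch, hcb]
          by_cases he : 1 = p.count best
          · exact Or.inr ⟨he, hch best hmem⟩
          · left; omega
      · show ((p.count best : Int)) = ((p ++ [ch]).count best : Int)
        rw [hcb]

theorem pvFoldB (s p : List Char) (st : Char × Int × Option Char × Int)
    (hps : (p ++ s).Pairwise (· ≤ ·)) (hinv : pvInvB p st) :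
    pvInvB (p ++ s) (s.foldl pvBScan st) := by
  induction s generalizing p st with
  | nil => simpa using hinv
  | cons ch s' ih =>
    obtain ⟨hp, hq, hpq⟩ := List.pairwise_append.1 hps
    have hch : ∀ x ∈ p, x ≤ ch := fun x hx => hpq x hx ch List.mem_cons_self
    have hstep := pvInvB_step p ch st hp hch hinv
    have hps' : ((p ++ [ch]) ++ s').Pairwise (· ≤ ·) := by
      rw [List.append_assoc]; simpa using hps
    have := ih (p ++ [ch]) (pvBScan st ch) hps' hstep
    simpa [List.append_assoc] using this

theorem pvBPos_spec (codons : List String) (pos : Int)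
    (h : pvBChars codons pos ≠ []) : pvIsPick (pvBChars codons pos) (pvBPos codons pos) := by
  have hpair : (pvBChars codons pos).Pairwise (· ≤ ·) := by
    have := PySem.List.sorted_pairwise (pvBRaw codons pos) (fun x => x)
    simpa [pvBChars] using this
  have hfold := pvFoldB (pvBChars codons pos) [] ('-', 0, none, 0)
    (by simpa using hpair) (Or.inl ⟨rfl, rfl⟩)
  simp only [List.nil_append] at hfold
  rcases hfold with ⟨hnil, _⟩ | ⟨_, _, _, hpick, _⟩
  · exact absurd hnil h
  · exact hpick

-- the two ways of building the informative character list coincide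
theorem pvBRaw_eq (codons : List String) (pos : Int) :
    pvBRaw codons pos = pvAInformative codons pos := by
  unfold pvBRaw pvAInformative pvAChars
  induction codons with
  | nil => rfl
  | cons c t ih =>
    by_cases h3 : (PySem.Str.len c == 3) = true
    · cases hg : (PySem.Str.pyGet? c pos).map PySem.Chars.upperChar with
      | none => simp only [List.filterMap_cons, List.filter_cons, h3, if_pos, hg, ih]
      | some ch =>
        by_cases hi : (!(ch == '-' || ch == '?' || ch == '.')) = true
        · simp only [List.filterMap_cons, List.filter_cons, h3, if_pos, hg, hi, ih]
        · have hb : (!(ch == '-' || ch == '?' || ch == '.')) = false := by simpa using hi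
          simp only [List.filterMap_cons, List.filter_cons, h3, if_pos, hg, hb,
            Bool.false_eq_true, if_false, ih]
    · have hb : (PySem.Str.len c == 3) = false := by simpa using h3
      simp only [List.filterMap_cons, List.filter_cons, hb, Bool.false_eq_true, if_false, ih]

theorem pvPos_eq (codons : List String) (pos : Int) :
    pvAPos codons pos = pvBPos codons pos := by
  by_cases hl : pvAInformative codons pos = []
  · unfold pvAPos pvBPos pvBChars
    rw [pvBRaw_eq, hl]
    rfl
  · have hperm : (pvBChars codons pos).Perm (pvAInformative codons pos) := by
      unfold pvBChars
      rw [pvBRaw_eq]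
      exact PySem.List.sorted_perm _ _ _
    have hsne : pvBChars codons pos ≠ [] := by
      intro hs
      exact hl ((hs ▸ hperm).symm.eq_nil)
    have hb := pvIsPick_of_perm hperm (pvBPos_spec codons pos hsne)
    have ha := pvASelect_spec (pvAInformative codons pos) hl
    exact pvIsPick_unique ha hb

-- ===== VERDICT (by name: the statement is the Claim_ definition above) =====
theorem consensus_nt_for_codons_py_spec : Claim_equal_consensus_nt_for_codons_py := by
  intro codons _
  unfold Spec_consensus_nt_for_codons_py consensus_nt_for_codons_py consensus_nt_for_codons_py_alt
  congr 1
  exact List.map_congr_left (fun pos _ => pvPos_eq codons pos)
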